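-- pv_equiv track=rewrite | github.com/llmartella/alletram | .github/gmatter/charlotte_pipe/contractor/prep/unspecified_structure.py | wildcard_search
-- ===== SOURCE A (Python) =====
-- from typing import List, Dict, Any
--
-- def wildcard_search(headers: List[str], search_terms: List[str]) -> str:
--     for header in headers:
--         if header and isinstance(header, str):
--             header_lower = header.lower().strip()
--             for term in search_terms:
--                 if term.lower() in header_lower:
--                     return header
--     return None
-- ===== SOURCE B (Python) =====
-- def wildcard_search(headers, search_terms):
--     # term-major: for each term find the first matching header index,
--     # scanning only below the current best index; answer = header at min index
--     norm = [h.lower().strip() if h and isinstance(h, str) else None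
--             for h in headers]
--     best = None
--     for term in search_terms:
--         t = term.lower()
--         sub = norm if best is None else norm[:best]
--         for i, hl in enumerate(sub):
--             if hl is not None and t in hl:
--                 if best is None or i < best:
--                     best = i
--                 break
--     return headers[best] if best is not None else None
-- ===== Notes on version B (the rewrite author's own statement) =====
-- stated objective: alternative
-- what changed: Header-major scan with an inner term loop is replaced by a term-major scan: headers are normalised once, each term finds its first matching header index (scanning only below the current best index, with an early break), and the answer is the header at the minimum such index.
import Mathlib
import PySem

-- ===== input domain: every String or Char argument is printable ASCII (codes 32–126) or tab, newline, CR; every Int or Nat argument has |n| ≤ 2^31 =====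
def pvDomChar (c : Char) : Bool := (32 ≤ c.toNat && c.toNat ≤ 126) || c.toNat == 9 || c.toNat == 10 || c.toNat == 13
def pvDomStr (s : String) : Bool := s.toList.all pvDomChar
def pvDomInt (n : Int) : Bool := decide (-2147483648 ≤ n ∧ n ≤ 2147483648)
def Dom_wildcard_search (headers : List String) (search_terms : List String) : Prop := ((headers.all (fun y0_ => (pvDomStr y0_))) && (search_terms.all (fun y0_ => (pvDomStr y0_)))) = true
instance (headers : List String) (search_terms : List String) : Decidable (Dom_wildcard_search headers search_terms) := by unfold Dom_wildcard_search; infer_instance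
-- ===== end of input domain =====

-- B replaces A's header-major scan (inner loop over terms, renormalising each header on every visit)
-- by a term-major scan: normalise headers once, find each term's first matching index (scanning only below the current best), take the minimum.

-- ===== PORT A =====
-- inner 'for term in search_terms: if term.lower() in header_lower: return header'
def wsScanA (header : String) (hl : String) (terms : List String) : Option String :=
  match terms with
  | [] => none
  | t :: ts =>
    if PySem.Str.isIn (PySem.Str.lower t) hl then some header else wsScanA header hl ts

def wildcard_search (headers : List String) (search_terms : List String) : Option String :=
  match headers with
  | [] => none
  | h :: rest =>
    if h ≠ "" then
      match wsScanA h (PySem.Str.strip (PySem.Str.lower h)) search_terms with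
      | some r => some r
      | none => wildcard_search rest search_terms
    else wildcard_search rest search_terms

-- ===== PORT B =====
-- inner 'for i, hl in enumerate(norm): if hl is not None and t in hl: … break'
def wsFirstIdx (t : String) (norm : List (Option String)) (i : Nat) : Option Nat :=
  match norm with
  | [] => none
  | o :: rest =>
    match o with
    | some hl => if PySem.Str.isIn t hl then some i else wsFirstIdx t rest (i + 1)
    | none => wsFirstIdx t rest (i + 1)

-- 'if best is None or i < best: best = i' (applied to the index found for one term, if any)
def wsStep (best : Option Nat) (idx : Option Nat) : Option Nat :=
  match idx with
  | none => best
  | some i =>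
    match best with
    | none => some i
    | some j => if i < j then some i else best

def wildcard_search_alt (headers : List String) (search_terms : List String) : Option String :=
  let norm := headers.map (fun h =>
    if h ≠ "" then some (PySem.Str.strip (PySem.Str.lower h)) else none)
  let best := search_terms.foldl
    (fun b term =>
      let sub := match b with
        | none => norm
        | some j => PySem.List.slice norm none (some (j : Int))   -- norm[:best]
      wsStep b (wsFirstIdx (PySem.Str.lower term) sub 0)) none
  match best with
  | none => none
  | some i => PySem.List.pyGet? headers (i : Int)

-- ===== PRECONDITION & SPEC =====
def Spec_wildcard_search (headers : List String) (search_terms : List String) (out : Option String) : Prop := out = wildcard_search_alt headers search_terms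
instance (headers : List String) (search_terms : List String) (out : Option String) : Decidable (Spec_wildcard_search headers search_terms out) := by unfold Spec_wildcard_search; infer_instance

-- ===== CLAIM (what is proved, stated in full; the proofs are below) =====
def Claim_equal_wildcard_search : Prop := ∀ (headers : List String) (search_terms : List String), Dom_wildcard_search headers search_terms → Spec_wildcard_search headers search_terms (wildcard_search headers search_terms)

-- ===== LEMMAS AND PROOFS =====

-- the per-header match predicate both programs decide
def wsHit (terms : List String) (h : String) : Bool :=
  decide (h ≠ "") && terms.any (fun t =>
    PySem.Str.isIn (PySem.Str.lower t) (PySem.Str.strip (PySem.Str.lower h)))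

-- 'does any of terms match this normalised slot'
def wsPredO (terms : List String) (o : Option String) : Bool :=
  match o with
  | some hl => terms.any (fun t => PySem.Str.isIn (PySem.Str.lower t) hl)
  | none => false

def wsQRaw (t : String) (o : Option String) : Bool :=
  match o with
  | some hl => PySem.Str.isIn t hl
  | none => false

-- index of the first slot matched by the predicate (proof-side spec middleman)
def firstHit (p : Option String → Bool) : List (Option String) → Option Nat
  | [] => none
  | o :: rest => if p o then some 0 else (firstHit p rest).map (· + 1)

theorem wsPredO_cons (t : String) (ts : List String) (o : Option String) :
    wsPredO (t :: ts) o = (wsPredO [t] o || wsPredO ts o) := by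
  cases o <;> simp [wsPredO]

theorem wsScanA_eq (header hl : String) (terms : List String) :
    wsScanA header hl terms =
      (if terms.any (fun t => PySem.Str.isIn (PySem.Str.lower t) hl) = true
       then some header else none) := by
  induction terms with
  | nil => rfl
  | cons t ts ih =>
    rw [wsScanA, ih]
    by_cases h : PySem.Str.isIn (PySem.Str.lower t) hl = true
    · rw [if_pos h, if_pos (show ((t :: ts).any fun t => PySem.Str.isIn (PySem.Str.lower t) hl) = true
        from by simp only [List.any_cons, h, Bool.true_or])]
    · have h' : PySem.Str.isIn (PySem.Str.lower t) hl = false := by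
        revert h; cases PySem.Str.isIn (PySem.Str.lower t) hl <;> simp
      rw [if_neg h]
      have hc : ((t :: ts).any fun t => PySem.Str.isIn (PySem.Str.lower t) hl)
          = (ts.any fun t => PySem.Str.isIn (PySem.Str.lower t) hl) := by
        simp only [List.any_cons, h', Bool.false_or]
      simp only [hc]

theorem wildcard_search_eq_find (headers terms : List String) :
    wildcard_search headers terms = headers.find? (wsHit terms) := by
  induction headers with
  | nil => rfl
  | cons h rest ih =>
    show (if h ≠ "" then
        match wsScanA h (PySem.Str.strip (PySem.Str.lower h)) terms with
        | some r => some r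
        | none => wildcard_search rest terms
      else wildcard_search rest terms) = _
    by_cases he : h ≠ ""
    · rw [if_pos he, wsScanA_eq]
      cases hm : terms.any (fun t =>
          PySem.Str.isIn (PySem.Str.lower t) (PySem.Str.strip (PySem.Str.lower h))) with
      | true =>
        rw [if_pos rfl, List.find?_cons_of_pos
          (by simp only [wsHit, hm, Bool.and_true]; exact decide_eq_true he)]
      | false =>
        rw [if_neg (by decide)]
        show wildcard_search rest terms = _
        rw [ih, List.find?_cons_of_neg (by simp only [wsHit, hm, Bool.and_false]; decide)]
    · rw [if_neg he]
      rw [ih, List.find?_cons_of_neg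
        (by simp only [wsHit]; rw [decide_eq_false he, Bool.false_and]; decide)]

theorem wsQRaw_lower (t : String) : wsQRaw (PySem.Str.lower t) = wsPredO [t] := by
  funext o; cases o <;> simp [wsQRaw, wsPredO]

theorem wsFirstIdx_eq (t : String) (norm : List (Option String)) (i : Nat) :
    wsFirstIdx t norm i = (firstHit (wsQRaw t) norm).map (· + i) := by
  induction norm generalizing i with
  | nil => rfl
  | cons o rest ih =>
    match o with
    | none =>
      show wsFirstIdx t rest (i + 1) = ((firstHit (wsQRaw t) (none :: rest)).map (· + i))
      rw [ih, show firstHit (wsQRaw t) (none :: rest)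
            = (firstHit (wsQRaw t) rest).map (· + 1) from by
          rw [firstHit, if_neg (by simp [wsQRaw])]]
      cases firstHit (wsQRaw t) rest with
      | none => rfl
      | some a => simp only [Option.map_some, Option.some.injEq]; omega
    | some hl =>
      show (if PySem.Str.isIn t hl = true then some i else wsFirstIdx t rest (i + 1))
          = ((firstHit (wsQRaw t) (some hl :: rest)).map (· + i))
      cases h : PySem.Str.isIn t hl with
      | true =>
        rw [if_pos rfl, show firstHit (wsQRaw t) (some hl :: rest) = some 0 from by
          rw [firstHit, if_pos (show wsQRaw t (some hl) = true from h)]]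
        simp only [Option.map_some, Option.some.injEq]; omega
      | false =>
        rw [if_neg (by decide), ih, show firstHit (wsQRaw t) (some hl :: rest)
              = (firstHit (wsQRaw t) rest).map (· + 1) from by
            rw [firstHit, if_neg (by rw [show wsQRaw t (some hl) = false from h]; decide)]]
        cases firstHit (wsQRaw t) rest with
        | none => rfl
        | some a => simp only [Option.map_some, Option.some.injEq]; omega

theorem wsStep_none_left (x : Option Nat) : wsStep none x = x := by cases x <;> rfl

theorem wsStep_none_right (x : Option Nat) : wsStep x none = x := rfl

theorem wsStep_some_some (a b : Nat) : wsStep (some a) (some b) = some (min a b) := by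
  simp only [wsStep]
  split_ifs with h <;> congr 1 <;> omega

theorem wsStep_zero_left (x : Option Nat) : wsStep (some 0) x = some 0 := by
  cases x with
  | none => rfl
  | some j => rw [wsStep_some_some]; simp

theorem wsStep_assoc (a b c : Option Nat) : wsStep (wsStep a b) c = wsStep a (wsStep b c) := by
  cases a with
  | none => rw [wsStep_none_left, wsStep_none_left]
  | some i =>
    cases b with
    | none => rw [wsStep_none_right, wsStep_none_left]
    | some j =>
      cases c with
      | none => rw [wsStep_none_right, wsStep_none_right]
      | some k =>
        rw [wsStep_some_some, wsStep_some_some, wsStep_some_some, wsStep_some_some,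
          Nat.min_assoc]

theorem wsStep_map_succ (a b : Option Nat) :
    wsStep (a.map (· + 1)) (b.map (· + 1)) = (wsStep a b).map (· + 1) := by
  cases a with
  | none => simp only [Option.map_none, wsStep_none_left]
  | some i =>
    cases b with
    | none => simp only [Option.map_none, wsStep_none_right]
    | some j =>
      simp only [Option.map_some, wsStep_some_some, Option.some.injEq]
      omega

def wsMfold (F : String → Option Nat) (terms : List String) : Option Nat :=
  terms.foldr (fun t acc => wsStep (F t) acc) none

theorem wsFoldl_eq_mfold (F : String → Option Nat) (terms : List String) (b : Option Nat) :
    terms.foldl (fun b t => wsStep b (F t)) b = wsStep b (wsMfold F terms) := by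
  induction terms generalizing b with
  | nil => rw [List.foldl_nil, wsMfold, List.foldr_nil, wsStep_none_right]
  | cons t ts ih =>
    rw [List.foldl_cons, ih, wsStep_assoc]
    rfl

theorem wsMfold_none (terms : List String) : wsMfold (fun _ => none) terms = none := by
  induction terms with
  | nil => rfl
  | cons t ts ih =>
    show wsStep none (wsMfold (fun _ => none) ts) = none
    rw [wsStep_none_left]; exact ih

theorem wsMfold_map_succ (G : String → Option Nat) (terms : List String) :
    wsMfold (fun t => (G t).map (· + 1)) terms = (wsMfold G terms).map (· + 1) := by
  induction terms with
  | nil => rfl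
  | cons t ts ih =>
    show wsStep ((G t).map (· + 1)) (wsMfold (fun t => (G t).map (· + 1)) ts)
        = (wsStep (G t) (wsMfold G ts)).map (· + 1)
    rw [ih, wsStep_map_succ]

theorem wsMfold_zero (o : Option String) (rest : List (Option String)) (terms : List String) :
    wsPredO terms o = true →
      wsMfold (fun t => firstHit (wsPredO [t]) (o :: rest)) terms = some 0 := by
  induction terms with
  | nil => intro h; cases o <;> simp [wsPredO] at h
  | cons t ts ih =>
    intro h
    show wsStep (firstHit (wsPredO [t]) (o :: rest))
        (wsMfold (fun t => firstHit (wsPredO [t]) (o :: rest)) ts) = some 0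
    cases ht : wsPredO [t] o with
    | true =>
      rw [show firstHit (wsPredO [t]) (o :: rest) = some 0 from by
          rw [firstHit, if_pos ht],
        wsStep_zero_left]
    | false =>
      have hts : wsPredO ts o = true := by
        rw [wsPredO_cons, ht, Bool.false_or] at h; exact h
      rw [ih hts]
      cases hf : firstHit (wsPredO [t]) (o :: rest) with
      | none => rw [wsStep_none_left]
      | some j => rw [wsStep_some_some]; simp

theorem wsMfold_shift (o : Option String) (rest : List (Option String)) (terms : List String) :
    wsPredO terms o = false →
      wsMfold (fun t => firstHit (wsPredO [t]) (o :: rest)) terms =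
        wsMfold (fun t => (firstHit (wsPredO [t]) rest).map (· + 1)) terms := by
  induction terms with
  | nil => intro _; rfl
  | cons t ts ih =>
    intro h
    rw [wsPredO_cons, Bool.or_eq_false_iff] at h
    show wsStep (firstHit (wsPredO [t]) (o :: rest))
        (wsMfold (fun t => firstHit (wsPredO [t]) (o :: rest)) ts)
      = wsStep ((firstHit (wsPredO [t]) rest).map (· + 1))
        (wsMfold (fun t => (firstHit (wsPredO [t]) rest).map (· + 1)) ts)
    rw [ih h.2, show firstHit (wsPredO [t]) (o :: rest)
          = (firstHit (wsPredO [t]) rest).map (· + 1) from by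
        rw [firstHit, if_neg (by rw [h.1]; decide)]]

theorem wsMfold_eq_firstHit (norm : List (Option String)) (terms : List String) :
    wsMfold (fun t => firstHit (wsPredO [t]) norm) terms = firstHit (wsPredO terms) norm := by
  induction norm with
  | nil => exact wsMfold_none terms
  | cons o rest ih =>
    cases hany : wsPredO terms o with
    | true =>
      rw [wsMfold_zero o rest terms hany, firstHit, if_pos hany]
    | false =>
      rw [wsMfold_shift o rest terms hany, wsMfold_map_succ, ih, firstHit,
        if_neg (by rw [hany]; decide)]

theorem wsPredO_norm (terms : List String) (h : String) :
    wsPredO terms (if h ≠ "" then some (PySem.Str.strip (PySem.Str.lower h)) else none) =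
      wsHit terms h := by
  by_cases he : h ≠ ""
  · rw [if_pos he]
    show (terms.any fun t => PySem.Str.isIn (PySem.Str.lower t) (PySem.Str.strip (PySem.Str.lower h))) = _
    rw [wsHit, decide_eq_true he, Bool.true_and]
  · rw [if_neg he]
    show false = _
    rw [wsHit, decide_eq_false he, Bool.false_and]

theorem firstHit_find (headers terms : List String) :
    (match firstHit (wsPredO terms)
        (headers.map (fun h => if h ≠ "" then some (PySem.Str.strip (PySem.Str.lower h)) else none)) with
      | none => (none : Option String)
      | some i => PySem.List.pyGet? headers (i : Int)) = headers.find? (wsHit terms) := by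
  induction headers with
  | nil => rfl
  | cons h rest ih =>
    rw [List.map_cons, firstHit, wsPredO_norm]
    cases hw : wsHit terms h with
    | true =>
      rw [if_pos rfl, List.find?_cons_of_pos hw]
      show PySem.List.pyGet? (h :: rest) ((0 : Nat) : Int) = some h
      rw [PySem.List.pyGet?_natCast]
      rfl
    | false =>
      rw [if_neg (by decide), List.find?_cons_of_neg (by simp [hw]), ← ih]
      cases hf : firstHit (wsPredO terms)
          (rest.map (fun h => if h ≠ "" then some (PySem.Str.strip (PySem.Str.lower h)) else none)) with
      | none => rfl
      | some i =>
        show PySem.List.pyGet? (h :: rest) (((i + 1 : Nat) : Int)) = PySem.List.pyGet? rest (i : Int)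
        rw [PySem.List.pyGet?_natCast, PySem.List.pyGet?_natCast]
        simp

theorem firstHit_take (p : Option String → Bool) (l : List (Option String)) (b : Nat) :
    firstHit p (l.take b) =
      (match firstHit p l with
        | none => none
        | some i => if i < b then some i else none) := by
  induction l generalizing b with
  | nil => simp [firstHit]
  | cons o rest ih =>
    cases b with
    | zero =>
      rw [List.take_zero]
      cases hf : firstHit p (o :: rest) with
      | none => rfl
      | some i =>
        show (none : Option Nat) = if i < 0 then some i else none
        rw [if_neg (by omega)]
    | succ b' =>
      rw [List.take_succ_cons]
      by_cases hp : p o = true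
      · rw [show firstHit p (o :: List.take b' rest) = some 0 from by rw [firstHit, if_pos hp],
          show firstHit p (o :: rest) = some 0 from by rw [firstHit, if_pos hp]]
        show some 0 = if 0 < b' + 1 then some 0 else none
        rw [if_pos (Nat.succ_pos b')]
      · rw [show firstHit p (o :: List.take b' rest)
              = (firstHit p (List.take b' rest)).map (· + 1) from by rw [firstHit, if_neg hp],
          show firstHit p (o :: rest) = (firstHit p rest).map (· + 1) from by
            rw [firstHit, if_neg hp],
          ih]
        cases hr : firstHit p rest with
        | none => rfl
        | some i =>
          show Option.map (fun x => x + 1) (if i < b' then some i else none)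
              = if i + 1 < b' + 1 then some (i + 1) else none
          by_cases h : i < b'
          · rw [if_pos h, if_pos (by omega)]
            rfl
          · rw [if_neg h, if_neg (by omega)]
            rfl

theorem step_cap_take (p : Option String → Bool) (norm : List (Option String)) (j : Nat) :
    wsStep (some j) (firstHit p (norm.take j)) = wsStep (some j) (firstHit p norm) := by
  rw [firstHit_take]
  cases hf : firstHit p norm with
  | none => rfl
  | some i =>
    show wsStep (some j) (if i < j then some i else none) = wsStep (some j) (some i)
    by_cases h : i < j
    · rw [if_pos h]
    · rw [if_neg h, wsStep_none_right, wsStep_some_some]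
      congr 1
      omega

theorem wsMap_add_zero (x : Option Nat) : x.map (· + 0) = x := by cases x <;> simp

theorem foldl_cap_eq (norm : List (Option String)) (terms : List String) (b : Option Nat) :
    terms.foldl
        (fun b term =>
          wsStep b (wsFirstIdx (PySem.Str.lower term)
            (match b with
              | none => norm
              | some j => PySem.List.slice norm none (some (j : Int))) 0)) b
      = terms.foldl (fun b term => wsStep b (wsFirstIdx (PySem.Str.lower term) norm 0)) b := by
  induction terms generalizing b with
  | nil => rfl
  | cons t ts ih =>
    rw [List.foldl_cons, List.foldl_cons, ih]
    congr 1
    cases b with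
    | none => rfl
    | some j =>
      show wsStep (some j) (wsFirstIdx (PySem.Str.lower t)
          (PySem.List.slice norm none (some (j : Int))) 0) = _
      rw [PySem.List.slice_to_natCast, wsFirstIdx_eq, wsFirstIdx_eq, wsMap_add_zero,
        wsMap_add_zero, step_cap_take]

-- ===== VERDICT (by name: the statement is the Claim_ definition above) =====
theorem wildcard_search_spec : Claim_equal_wildcard_search := by
  intro headers terms _
  unfold Spec_wildcard_search
  rw [wildcard_search_eq_find]
  unfold wildcard_search_alt
  simp only
  rw [foldl_cap_eq, wsFoldl_eq_mfold, wsStep_none_left]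
  have hF : (fun t => wsFirstIdx (PySem.Str.lower t)
      (headers.map (fun h => if h ≠ "" then some (PySem.Str.strip (PySem.Str.lower h)) else none)) 0) =
      (fun t => firstHit (wsPredO [t])
        (headers.map (fun h => if h ≠ "" then some (PySem.Str.strip (PySem.Str.lower h)) else none))) := by
    funext t
    rw [wsFirstIdx_eq, wsQRaw_lower]
    cases firstHit (wsPredO [t])
        (headers.map (fun h => if h ≠ "" then some (PySem.Str.strip (PySem.Str.lower h)) else none)) <;> simp
  rw [hF, wsMfold_eq_firstHit]
  exact (firstHit_find headers terms).symm
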